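-- pv_equiv track=rewrite | github.com/himanshukandari14/multi-agent-orchestrator | backend/app/core/tools/patch_tool.py | _count_hunk_lines
-- ===== SOURCE A (Python) =====
-- def _count_hunk_lines(body: list[str]) -> tuple[int, int]:
--     """Return (old_line_count, new_line_count) for a unified-diff hunk body."""
--     old_n, new_n = 0, 0
--     for line in body:
--         if not line:
--             continue
--         c = line[0]
--         if c == " ":
--             old_n += 1
--             new_n += 1
--         elif c == "-":
--             old_n += 1
--         elif c == "+":
--             new_n += 1
--         elif c == "\\":
--             continue
--         else:
--             break
--     return old_n, new_n
-- ===== SOURCE B (Python) =====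
-- from itertools import takewhile
--
-- def _count_hunk_lines(body: list[str]) -> tuple[int, int]:
--     """Return (old_line_count, new_line_count) for a unified-diff hunk body."""
--     prefix = list(takewhile(lambda l: (not l) or l[0] in " -+\\", body))
--     old_n = sum(1 for l in prefix if l and l[0] in " -")
--     new_n = sum(1 for l in prefix if l and l[0] in " +")
--     return old_n, new_n
-- ===== Notes on version B (the rewrite author's own statement) =====
-- stated objective: alternative
-- what changed: Replaced the single stateful loop with continue/break and two mutable counters by takewhile prefix extraction followed by two independent counting passes over the materialized prefix.
import Mathlib
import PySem

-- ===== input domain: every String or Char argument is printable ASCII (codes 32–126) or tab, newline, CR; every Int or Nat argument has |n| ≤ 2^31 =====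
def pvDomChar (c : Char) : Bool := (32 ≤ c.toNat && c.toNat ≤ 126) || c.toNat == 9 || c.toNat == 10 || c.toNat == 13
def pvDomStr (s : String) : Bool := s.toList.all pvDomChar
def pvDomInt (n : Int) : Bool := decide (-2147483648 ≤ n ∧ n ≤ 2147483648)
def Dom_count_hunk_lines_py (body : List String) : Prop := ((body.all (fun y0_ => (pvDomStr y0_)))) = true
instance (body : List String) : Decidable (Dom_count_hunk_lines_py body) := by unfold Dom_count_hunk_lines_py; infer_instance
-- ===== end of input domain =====

-- B replaces A's single stateful loop (continue/break, two mutable counters) by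
-- takeWhile prefix extraction followed by two independent counting passes (objective: alternative).

-- ===== PORT A =====
-- the for-loop with its two accumulators; 'break' returns the accumulators immediately
def countHunkLoopA : List String → Int → Int → Int × Int
  | [], old_n, new_n => (old_n, new_n)
  | line :: rest, old_n, new_n =>
    match line.toList with
    | [] => countHunkLoopA rest old_n new_n           -- 'if not line: continue'
    | c :: _ =>
      if c = ' ' then countHunkLoopA rest (old_n + 1) (new_n + 1)
      else if c = '-' then countHunkLoopA rest (old_n + 1) new_n
      else if c = '+' then countHunkLoopA rest old_n (new_n + 1)
      else if c = '\\' then countHunkLoopA rest old_n new_n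
      else (old_n, new_n)                             -- 'break'

def count_hunk_lines_py (body : List String) : Int × Int :=
  countHunkLoopA body 0 0

-- ===== PORT B =====
-- takewhile predicate: (not l) or l[0] in " -+\\"
def hunkKeep (l : String) : Bool :=
  match l.toList with
  | [] => true
  | c :: _ => c = ' ' || c = '-' || c = '+' || c = '\\'

-- 'l and l[0] in " -"'
def isOldLine (l : String) : Bool :=
  match l.toList with
  | [] => false
  | c :: _ => c = ' ' || c = '-'

-- 'l and l[0] in " +"'
def isNewLine (l : String) : Bool :=
  match l.toList with
  | [] => false
  | c :: _ => c = ' ' || c = '+'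

def count_hunk_lines_py_alt (body : List String) : Int × Int :=
  let pfx := body.takeWhile hunkKeep
  ((pfx.countP isOldLine : Int), (pfx.countP isNewLine : Int))

-- ===== PRECONDITION & SPEC =====
def Spec_count_hunk_lines_py (body : List String) (out : Int × Int) : Prop := out = count_hunk_lines_py_alt body
instance (body : List String) (out : Int × Int) : Decidable (Spec_count_hunk_lines_py body out) := by unfold Spec_count_hunk_lines_py; infer_instance

-- ===== CLAIM (what is proved, stated in full; the proofs are below) =====
def Claim_equal_count_hunk_lines_py : Prop := ∀ (body : List String), Dom_count_hunk_lines_py body → Spec_count_hunk_lines_py body (count_hunk_lines_py body)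

-- ===== LEMMAS AND PROOFS =====

-- loop invariant: A's loop adds B's two prefix counts to its accumulators
theorem countHunkLoopA_eq (body : List String) : ∀ (o n : Int),
    countHunkLoopA body o n =
      (o + ((body.takeWhile hunkKeep).countP isOldLine : Int),
       n + ((body.takeWhile hunkKeep).countP isNewLine : Int)) := by
  induction body with
  | nil => intro o n; simp [countHunkLoopA]
  | cons line rest ih =>
    intro o n
    rcases hl : line.toList with _ | ⟨c, cs⟩
    · have hk : hunkKeep line = true := by simp [hunkKeep, hl]
      have ho : isOldLine line = false := by simp [isOldLine, hl]
      have hn : isNewLine line = false := by simp [isNewLine, hl]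
      simp [countHunkLoopA, hl, List.takeWhile, hk, ho, hn, ih]
    · by_cases hsp : c = ' '
      · have hk : hunkKeep line = true := by simp [hunkKeep, hl, hsp]
        have ho : isOldLine line = true := by simp [isOldLine, hl, hsp]
        have hn : isNewLine line = true := by simp [isNewLine, hl, hsp]
        simp [countHunkLoopA, hl, hsp, List.takeWhile, hk, ho, hn, ih]
        constructor <;> ring
      · by_cases hmi : c = '-'
        · have hk : hunkKeep line = true := by simp [hunkKeep, hl, hmi]
          have ho : isOldLine line = true := by simp [isOldLine, hl, hmi]
          have hn : isNewLine line = false := by simp [isNewLine, hl, hmi]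
          simp [countHunkLoopA, hl, hmi, List.takeWhile, hk, ho, hn, ih]
          ring
        · by_cases hpl : c = '+'
          · have hk : hunkKeep line = true := by simp [hunkKeep, hl, hpl]
            have ho : isOldLine line = false := by simp [isOldLine, hl, hpl]
            have hn : isNewLine line = true := by simp [isNewLine, hl, hpl]
            simp [countHunkLoopA, hl, hpl, List.takeWhile, hk, ho, hn, ih]
            ring
          · by_cases hbs : c = '\\'
            · have hk : hunkKeep line = true := by simp [hunkKeep, hl, hbs]
              have ho : isOldLine line = false := by simp [isOldLine, hl, hbs]
              have hn : isNewLine line = false := by simp [isNewLine, hl, hbs]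
              simp [countHunkLoopA, hl, hbs, List.takeWhile, hk, ho, hn, ih]
            · have hk : hunkKeep line = false := by
                simp [hunkKeep, hl, hsp, hmi, hpl, hbs]
              simp [countHunkLoopA, hl, hsp, hmi, hpl, hbs, List.takeWhile, hk]

-- ===== VERDICT (by name: the statement is the Claim_ definition above) =====
theorem count_hunk_lines_py_spec : Claim_equal_count_hunk_lines_py := by
  intro body _
  unfold Spec_count_hunk_lines_py count_hunk_lines_py count_hunk_lines_py_alt
  simp [countHunkLoopA_eq]
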